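-- pv_equiv track=rewrite | github.com/ndjenkins85/otsukare | otsukare/analysis.py | get_words_from_needs
-- ===== SOURCE A (Python) =====
-- def get_words_from_needs(sent):
--     terms = []
--     word = ""
--     capture = False
--     for c in sent:
--         if c == "]":
--             capture = False
--             terms.append(word)
--             word = ""
--
--         if capture:
--             word += c
--
--         if c == "[":
--             capture = True
--     return terms
-- ===== SOURCE B (Python) =====
-- def get_words_from_needs(sent):
--     terms = []
--     parts = sent.split("]")
--     for part in parts[:-1]:
--         i = part.find("[")
--         terms.append(part[i + 1:] if i != -1 else "")
--     return terms
-- ===== Notes on version B (the rewrite author's own statement) =====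
-- stated objective: simpler
-- what changed: Replaces the char-by-char capture state machine with splitting the string on the closing bracket, then locating the first opening bracket per segment and slicing its tail (dropping the final unterminated segment).
import Mathlib
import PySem

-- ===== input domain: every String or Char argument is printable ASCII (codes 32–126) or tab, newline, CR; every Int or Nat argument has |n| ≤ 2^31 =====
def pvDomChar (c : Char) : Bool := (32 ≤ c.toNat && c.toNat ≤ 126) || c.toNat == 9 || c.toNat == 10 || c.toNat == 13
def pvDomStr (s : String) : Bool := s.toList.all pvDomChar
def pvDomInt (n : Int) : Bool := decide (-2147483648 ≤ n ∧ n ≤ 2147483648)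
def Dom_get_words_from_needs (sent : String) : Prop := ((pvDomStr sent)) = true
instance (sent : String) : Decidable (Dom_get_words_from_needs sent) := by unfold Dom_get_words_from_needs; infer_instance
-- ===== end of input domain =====

-- B replaces A's char-by-char capture state machine by split-on-']' then find-'['-per-segment; objective: simpler.

-- ===== PORT A =====
-- A's loop: state (terms, word, capture); the three sequential ifs of the Python body
-- are kept in order (the accumulating Python string `word` is represented as List Char).
def pvAGo : List Char → List (List Char) → List Char → Bool → List (List Char)
  | [], terms, _, _ => terms
  | c :: cs, terms, word, capture =>
    let capture1 := if c = ']' then false else capture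
    let terms1   := if c = ']' then terms ++ [word] else terms
    let word1    := if c = ']' then ([] : List Char) else word
    let word2    := if capture1 then word1 ++ [c] else word1
    let capture2 := if c = '[' then true else capture1
    pvAGo cs terms1 word2 capture2

def get_words_from_needs (sent : String) : List String :=
  (pvAGo sent.toList [] [] false).map String.mk

-- ===== PORT B =====
-- part.find("[") and part[i+1:] of Source B, on one split segment.
def pvBPart (part : List Char) : List Char :=
  let i := PySem.Chars.find part ['[']
  if i ≠ -1 then PySem.Chars.slice part (some (i + 1)) none else []

-- parts = sent.split("]"); loop over parts[:-1] appending pvBPart of each (= map).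
def get_words_from_needs_alt (sent : String) : List String :=
  ((PySem.Chars.splitOn sent.toList [']']).dropLast).map (fun part => String.mk (pvBPart part))

-- ===== PRECONDITION & SPEC =====
def Spec_get_words_from_needs (sent : String) (out : List String) : Prop := out = get_words_from_needs_alt sent
instance (sent : String) (out : List String) : Decidable (Spec_get_words_from_needs sent out) := by unfold Spec_get_words_from_needs; infer_instance

-- ===== CLAIM (what is proved, stated in full; the proofs are below) =====
def Claim_equal_get_words_from_needs : Prop := ∀ (sent : String), Dom_get_words_from_needs sent → Spec_get_words_from_needs sent (get_words_from_needs sent)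

-- ===== LEMMAS AND PROOFS =====

-- Reference split of a char list at ']' (Python str.split("]") semantics).
def pvSp : List Char → List (List Char)
  | [] => [[]]
  | c :: cs =>
    if c = ']' then [] :: pvSp cs
    else
      match pvSp cs with
      | [] => [[c]]
      | p :: ps => (c :: p) :: ps

theorem pvSp_ne_nil (l : List Char) : pvSp l ≠ [] := by
  cases l with
  | nil => simp [pvSp]
  | cons c cs =>
    simp only [pvSp]
    split
    · simp
    · split <;> simp

def pvPrepend (w : List Char) : List (List Char) → List (List Char)
  | [] => [w]
  | p :: ps => (w ++ p) :: ps

theorem pvPrepend_nil (segs : List (List Char)) (h : segs ≠ []) : pvPrepend [] segs = segs := by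
  cases segs with
  | nil => exact absurd rfl h
  | cons p ps => simp [pvPrepend]

theorem pvGo_eq (fuel : Nat) : ∀ (l cur : List Char) (accs : List (List Char)),
    l.length < fuel →
    PySem.Chars.splitOn.go [']'] fuel l cur accs = accs.reverse ++ pvPrepend cur.reverse (pvSp l) := by
  induction fuel with
  | zero => intro l cur accs h; omega
  | succ f ih =>
    intro l cur accs h
    cases l with
    | nil => simp [PySem.Chars.splitOn.go, pvSp, pvPrepend]
    | cons c rest =>
      by_cases hc : c = ']'
      · subst hc
        have hpre : List.isPrefixOf [']'] (']' :: rest) = true := by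
          simp [List.isPrefixOf]
        rw [PySem.Chars.splitOn.go]
        simp only [hpre, if_pos]
        have hdrop : List.drop (List.length [']']) (']' :: rest) = rest := by simp
        rw [hdrop, ih rest [] (cur.reverse :: accs) (by simp at h; omega)]
        simp only [List.reverse_nil]
        rw [pvPrepend_nil _ (pvSp_ne_nil rest)]
        simp [pvSp, pvPrepend]
      · have hpre : List.isPrefixOf [']'] (c :: rest) = false := by
          simp [List.isPrefixOf]
          intro hcontra; exact absurd hcontra.symm hc
        rw [PySem.Chars.splitOn.go]
        simp only [hpre, Bool.false_eq_true, if_false]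
        rw [ih rest (c :: cur) accs (by simp at h; omega)]
        simp only [pvSp, hc, if_false]
        rcases hq : pvSp rest with _ | ⟨p, ps⟩
        · exact absurd hq (pvSp_ne_nil rest)
        · simp [pvPrepend]

theorem pvSplitOn_eq (l : List Char) : PySem.Chars.splitOn l [']'] = pvSp l := by
  rw [PySem.Chars.splitOn, pvGo_eq (l.length + 1) l [] [] (by omega)]
  simp [pvPrepend_nil _ (pvSp_ne_nil l)]

-- find.go with shifted start index
theorem pvFindGo_shift (sub : List Char) (hs : sub ≠ []) :
    ∀ (l : List Char) (k : Nat),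
    PySem.Chars.find.go sub l k =
      if PySem.Chars.find.go sub l 0 = -1 then -1 else PySem.Chars.find.go sub l 0 + k := by
  intro l
  induction l with
  | nil => intro k; simp [PySem.Chars.find.go, List.isEmpty_iff, hs]
  | cons c rest ih =>
    intro k
    rw [PySem.Chars.find.go]
    conv_rhs => rw [PySem.Chars.find.go]
    by_cases hp : List.isPrefixOf sub (c :: rest) = true
    · simp [hp]
    · simp only [hp, Bool.false_eq_true, if_false]
      have hge : -1 ≤ PySem.Chars.find.go sub rest 0 :=
        PySem.Chars.neg_one_le_find rest sub
      rw [ih (k + 1), ih 1]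
      by_cases h0 : PySem.Chars.find.go sub rest 0 = -1
      · simp [h0]
      · rw [if_neg h0, if_neg h0, if_neg (by omega)]
        push_cast
        omega

theorem pvBPart_nil : pvBPart [] = [] := by decide

theorem pvBPart_lb (p : List Char) : pvBPart ('[' :: p) = p := by
  have hfind : PySem.Chars.find ('[' :: p) ['['] = 0 := by
    rw [PySem.Chars.find, PySem.Chars.find.go]
    simp [List.isPrefixOf]
  simp only [pvBPart, hfind]
  rw [if_pos (by decide)]
  rw [PySem.Chars.slice, PySem.List.slice_from _ (by omega)]
  simp

theorem pvBPart_cons (c : Char) (p : List Char) (hc : c ≠ '[') : pvBPart (c :: p) = pvBPart p := by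
  have hpre : List.isPrefixOf ['['] (c :: p) = false := by
    simp [List.isPrefixOf]
    intro hcontra; exact absurd hcontra.symm hc
  have hstep : PySem.Chars.find (c :: p) ['['] =
      if PySem.Chars.find p ['['] = -1 then -1 else PySem.Chars.find p ['['] + 1 := by
    rw [PySem.Chars.find, PySem.Chars.find.go]
    simp only [hpre, Bool.false_eq_true, if_false]
    rw [pvFindGo_shift ['['] (by simp) p 1]
    rfl
  by_cases hneg : PySem.Chars.find p ['['] = -1
  · simp [pvBPart, hstep, hneg]
  · have hge : -1 ≤ PySem.Chars.find p ['['] := PySem.Chars.neg_one_le_find p ['[']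
    simp only [pvBPart, hstep, hneg, if_false]
    rw [if_pos (by omega : ¬ PySem.Chars.find p ['['] + 1 = -1),
      if_pos (show ¬ PySem.Chars.find p ['['] = -1 from hneg)]
    rw [PySem.Chars.slice, PySem.Chars.slice, PySem.List.slice_from _ (by omega),
      PySem.List.slice_from _ (by omega)]
    have h1 : (PySem.Chars.find p ['['] + 1 + 1).toNat = (PySem.Chars.find p ['['] + 1).toNat + 1 := by
      omega
    rw [h1]
    simp

-- the value B produces from the first pending segment, given A's in-flight state
def pvRest (word : List Char) (capture : Bool) : List (List Char) → List (List Char)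
  | [] => []
  | [_] => []
  | p :: q :: ps => (word ++ (if capture then p else pvBPart p)) :: ((q :: ps).dropLast.map pvBPart)

theorem pvRest_nil_false (segs : List (List Char)) :
    pvRest [] false segs = segs.dropLast.map pvBPart := by
  rcases segs with _ | ⟨p, _ | ⟨q, ps⟩⟩ <;> simp [pvRest]

theorem pvAGo_eq : ∀ (cs : List Char) (terms : List (List Char)) (word : List Char) (capture : Bool),
    pvAGo cs terms word capture = terms ++ pvRest word capture (pvSp cs) := by
  intro cs
  induction cs with
  | nil => intro terms word capture; simp [pvAGo, pvSp, pvRest]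
  | cons c rest ih =>
    intro terms word capture
    by_cases hc : c = ']'
    · subst hc
      have hstep : pvAGo (']' :: rest) terms word capture = pvAGo rest (terms ++ [word]) [] false := by
        simp [pvAGo]
      have hsp : pvSp (']' :: rest) = [] :: pvSp rest := by simp [pvSp]
      rw [hstep, ih, hsp, pvRest_nil_false]
      rcases hq : pvSp rest with _ | ⟨p, ps⟩
      · exact absurd hq (pvSp_ne_nil rest)
      · simp [pvRest, pvBPart_nil]
    · rcases hq : pvSp rest with _ | ⟨p, ps⟩
      · exact absurd hq (pvSp_ne_nil rest)
      · have hsp : pvSp (c :: rest) = (c :: p) :: ps := by simp [pvSp, hc, hq]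
        have hstep : pvAGo (c :: rest) terms word capture =
            pvAGo rest terms (if capture then word ++ [c] else word)
              (if c = '[' then true else capture) := by
          simp [pvAGo, hc]
        rw [hstep, ih, hsp, hq]
        congr 1
        rcases ps with _ | ⟨q, ps'⟩
        · by_cases hcap : capture <;> by_cases hlb : c = '[' <;>
            simp [pvRest]
        · by_cases hcap : capture
          · by_cases hlb : c = '[' <;> simp [pvRest, hcap, hlb]
          · by_cases hlb : c = '['
            · subst hlb
              simp [pvRest, hcap, pvBPart_lb]
            · simp [pvRest, hcap, hlb, pvBPart_cons c p hlb]

-- ===== VERDICT (by name: the statement is the Claim_ definition above) =====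
theorem get_words_from_needs_spec : Claim_equal_get_words_from_needs := by
  intro sent _
  unfold Spec_get_words_from_needs get_words_from_needs get_words_from_needs_alt
  rw [pvAGo_eq, pvRest_nil_false, pvSplitOn_eq]
  simp [Function.comp_def]
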